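-- pv_equiv track=rewrite | github.com/jonahkraft/EIP_WiSe24_25 | Übungsaufgaben/Muster/backtracking_binario_muster.py | complete_field
-- ===== SOURCE A (Python) =====
-- from typing import List, Tuple
--
-- def empty_cell(matrix: List[List[int]]) -> Tuple[int, int]:
--     for i in range(len(matrix)):
--         for j in range(len(matrix[i])):
--             if matrix[i][j] == 0:
--                 return i, j
--     return -1, -1
--
-- def allowed(matrix: List[List[int]], r: int, c: int) -> bool:
--
--     row = matrix[r]
--     col = [matrix[i][c] for i in range(len(matrix))]
--
--     def cond1(rc):
--         # Checke, ob in einer Zeile oder Spalte die Zahl 1 oder 2 mehr als zweimal hintereinander vorkommt.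
--         for i in range(len(rc)-2):
--             if rc[i] == rc[i+1] == rc[i+2] and rc[i] != 0:
--                 return False
--         return True
--
--     def cond2(rc):
--         # Checke, ob in einer Zeile oder Spalte mehr als die Hälfte der Einträge 1 oder 2 sind.
--         return rc.count(1) <= len(rc) // 2 and rc.count(2) <= len(rc) // 2
--
--     return all([cond1(row), cond2(row), cond1(col), cond2(col)])
--
-- def complete_field(matrix: List[List[int]]) -> bool:
--
--     y, x = empty_cell(matrix)
--     if y == -1:
--         return True
--
--     for stone in range(1, 3):
--         matrix[y][x] = stone
--         if allowed(matrix, y, x):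
--             if complete_field(matrix):
--                 return True
--         matrix[y][x] = 0
--     return False
-- ===== SOURCE B (Python) =====
-- # B: recursion over a precomputed row-major position list that skips filled
-- # cells, instead of A's full-grid rescan (empty_cell) at every search node.
-- # Like A, mutates matrix in place during the search (restored on failure).
-- from typing import List
--
--
-- def allowed(matrix: List[List[int]], r: int, c: int) -> bool:
--
--     row = matrix[r]
--     col = [matrix[i][c] for i in range(len(matrix))]
--
--     def cond1(rc):
--         for i in range(len(rc) - 2):
--             if rc[i] == rc[i + 1] == rc[i + 2] and rc[i] != 0:
--                 return False
--         return True
--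
--     def cond2(rc):
--         return rc.count(1) <= len(rc) // 2 and rc.count(2) <= len(rc) // 2
--
--     return all([cond1(row), cond2(row), cond1(col), cond2(col)])
--
--
-- def _solve(matrix: List[List[int]], ps: List[tuple], k: int) -> bool:
--     while k < len(ps) and matrix[ps[k][0]][ps[k][1]] != 0:
--         k += 1
--     if k == len(ps):
--         return True
--     y, x = ps[k]
--     matrix[y][x] = 1
--     if allowed(matrix, y, x) and _solve(matrix, ps, k + 1):
--         return True
--     matrix[y][x] = 2
--     if allowed(matrix, y, x) and _solve(matrix, ps, k + 1):
--         return True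
--     matrix[y][x] = 0
--     return False
--
--
-- def complete_field(matrix: List[List[int]]) -> bool:
--     ps = [(i, j) for i in range(len(matrix)) for j in range(len(matrix[i]))]
--     return _solve(matrix, ps, 0)
-- ===== Notes on version B (the rewrite author's own statement) =====
-- stated objective: alternative
-- what changed: B precomputes the row-major position list once and recurses over it, skipping filled cells, instead of A's empty_cell rescan of the whole grid at every search node; helpers allowed/cond1/cond2 are kept unchanged.
-- outside the precondition, e.g. on complete_field([[0, 1], [1]]): A returns True, B returns True
import Mathlib
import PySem

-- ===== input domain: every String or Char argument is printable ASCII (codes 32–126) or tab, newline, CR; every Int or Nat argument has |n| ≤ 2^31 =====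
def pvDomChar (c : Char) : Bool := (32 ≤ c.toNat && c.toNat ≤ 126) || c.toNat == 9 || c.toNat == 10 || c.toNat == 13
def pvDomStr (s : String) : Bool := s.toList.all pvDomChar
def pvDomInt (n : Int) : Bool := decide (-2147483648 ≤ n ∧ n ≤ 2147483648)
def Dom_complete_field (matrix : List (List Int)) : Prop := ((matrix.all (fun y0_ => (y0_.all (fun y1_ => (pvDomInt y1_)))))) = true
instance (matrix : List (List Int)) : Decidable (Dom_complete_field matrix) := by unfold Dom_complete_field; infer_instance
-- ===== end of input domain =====

-- B changes the search decomposition (recursion over a precomputed row-major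
-- position list that skips filled cells, instead of A's full-grid rescan per
-- node); objective: alternative.  Equivalence is about the RETURN value only:
-- both Pythons mutate `matrix` in place during the search (restored on failure).

-- ===== PORT A =====
-- shared cell accessors (identical code in both Pythons)
def cellGet (m : List (List Int)) (y x : Nat) : Int := (m.getD y []).getD x 0

def setCell (m : List (List Int)) (y x : Nat) (v : Int) : List (List Int) :=
  m.set y ((m.getD y []).set x v)

-- empty_cell: nested scan, first cell equal to 0, else (-1, -1)
def ecRowFind : List Int → Nat → Option Nat
  | [], _ => none
  | v :: vs, j => if v == 0 then some j else ecRowFind vs (j + 1)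

def ecFind : List (List Int) → Nat → Int × Int
  | [], _ => (-1, -1)
  | row :: rest, i =>
    match ecRowFind row 0 with
    | some j => ((i : Int), (j : Int))
    | none => ecFind rest (i + 1)

def empty_cell (m : List (List Int)) : Int × Int := ecFind m 0

-- allowed and its inner cond1/cond2 (identical code in both Pythons, shared)
def cond1 (rc : List Int) : Bool :=
  (List.range (rc.length - 2)).all (fun i =>
    !((rc.getD i 0 == rc.getD (i + 1) 0) && (rc.getD (i + 1) 0 == rc.getD (i + 2) 0)
      && !(rc.getD i 0 == 0)))

def cond2 (rc : List Int) : Bool :=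
  decide (rc.count 1 ≤ rc.length / 2) && decide (rc.count 2 ≤ rc.length / 2)

def colOf (m : List (List Int)) (c : Nat) : List Int :=
  m.map (fun row => row.getD c 0)

def allowed (m : List (List Int)) (r c : Nat) : Bool :=
  let row := m.getD r []
  let col := colOf m c
  cond1 row && cond2 row && cond1 col && cond2 col

-- number of zero cells: fuel bound for A's recursion (a pure totality guard;
-- the proof shows it never runs out, so the 0-fuel branch is unreachable)
def zeros (m : List (List Int)) : Nat := (m.map (fun row => row.count 0)).sum

def cfGo : Nat → List (List Int) → Bool
  | 0, _ => false
  | n + 1, m =>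
    let yx := empty_cell m
    if yx.1 == -1 then true
    else
      let y := yx.1.toNat
      let x := yx.2.toNat
      let m1 := setCell m y x 1
      if allowed m1 y x && cfGo n m1 then true
      else
        let m2 := setCell m y x 2
        if allowed m2 y x && cfGo n m2 then true
        else false

def complete_field (matrix : List (List Int)) : Bool := cfGo (zeros matrix + 1) matrix

-- ===== PORT B =====
-- row-major position list, built once
def positions (m : List (List Int)) : List (Nat × Nat) :=
  (List.range m.length).flatMap (fun i =>
    (List.range ((m.getD i []).length)).map (fun j => (i, j)))

-- _solve: structural recursion on the remaining positions, skipping filled cells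
def solveGo : List (Nat × Nat) → List (List Int) → Bool
  | [], _ => true
  | (y, x) :: rest, m =>
    if !(cellGet m y x == 0) then solveGo rest m
    else
      let m1 := setCell m y x 1
      if allowed m1 y x && solveGo rest m1 then true
      else
        let m2 := setCell m y x 2
        if allowed m2 y x && solveGo rest m2 then true
        else false

def complete_field_alt (matrix : List (List Int)) : Bool :=
  solveGo (positions matrix) matrix

-- ===== PRECONDITION & SPEC =====
-- Pre_ admits rectangular matrices and matrices without empty (0) cells; on other
-- ragged matrices A's column comprehension raises IndexError whenever the search
-- reaches an empty cell whose column index exceeds some row's length, which is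
-- not a closed-form condition on the input (A still returns on some such inputs).
def Pre_complete_field (matrix : List (List Int)) : Prop :=
  (∀ row ∈ matrix, row.length = (matrix.headD []).length) ∨ (∀ row ∈ matrix, (0 : Int) ∉ row)
instance (matrix : List (List Int)) : Decidable (Pre_complete_field matrix) := by
  unfold Pre_complete_field; infer_instance

def pvWitness_complete_field : List (List Int) := [[1, 0], [0, 1]]

def Spec_complete_field (matrix : List (List Int)) (out : Bool) : Prop :=
  out = complete_field_alt matrix
instance (matrix : List (List Int)) (out : Bool) : Decidable (Spec_complete_field matrix out) := by
  unfold Spec_complete_field; infer_instance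

-- ===== CLAIM (what is proved, stated in full; the proofs are below) =====
def Claim_equal_complete_field : Prop :=
  ∀ (matrix : List (List Int)), Dom_complete_field matrix → Pre_complete_field matrix →
    Spec_complete_field matrix (complete_field matrix)

-- ===== LEMMAS AND PROOFS =====

-- lexicographic (row-major) order on positions — proof-only helper
def plt (p q : Nat × Nat) : Prop := p.1 < q.1 ∨ (p.1 = q.1 ∧ p.2 < q.2)

theorem mem_positions {m : List (List Int)} {y x : Nat} :
    (y, x) ∈ positions m ↔ y < m.length ∧ x < (m.getD y []).length := by
  simp only [positions, List.mem_flatMap, List.mem_map, List.mem_range]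
  constructor
  · rintro ⟨i, hi, j, hj, h⟩
    obtain ⟨rfl, rfl⟩ : i = y ∧ j = x := by
      constructor <;> [exact congrArg Prod.fst h; exact congrArg Prod.snd h]
    exact ⟨hi, hj⟩
  · rintro ⟨hy, hx⟩
    exact ⟨y, hy, x, hx, rfl⟩

theorem pairwise_positions (m : List (List Int)) : List.Pairwise plt (positions m) := by
  unfold positions
  rw [List.pairwise_flatMap]
  constructor
  · intro i _
    rw [List.pairwise_map]
    exact List.pairwise_lt_range.imp (fun h => Or.inr ⟨rfl, h⟩)
  · refine List.pairwise_lt_range.imp ?_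
    intro i1 i2 h p hp q hq
    simp only [List.mem_map, List.mem_range] at hp hq
    obtain ⟨j1, _, rfl⟩ := hp
    obtain ⟨j2, _, rfl⟩ := hq
    exact Or.inl h

theorem ecRow_none : ∀ (row : List Int) (j0 : Nat),
    (∀ j < row.length, row.getD j 0 ≠ 0) → ecRowFind row j0 = none
  | [], _, _ => rfl
  | v :: vs, j0, h => by
    have h0 : v ≠ 0 := by simpa using h 0 (by simp)
    simp only [ecRowFind, beq_iff_eq, h0, if_false]
    exact ecRow_none vs (j0 + 1) (fun j hj => by simpa using h (j + 1) (by simpa using hj))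

theorem ecRow_some : ∀ (row : List Int) (x j0 : Nat), x < row.length →
    (∀ j < x, row.getD j 0 ≠ 0) → row.getD x 0 = 0 → ecRowFind row j0 = some (j0 + x)
  | v :: vs, 0, j0, _, _, h0 => by
    have : v = 0 := by simpa using h0
    simp [ecRowFind, this]
  | v :: vs, x + 1, j0, hx, hpre, h0 => by
    have hv : v ≠ 0 := by simpa using hpre 0 (by omega)
    have := ecRow_some vs x (j0 + 1) (by simpa using hx)
      (fun j hj => by simpa using hpre (j + 1) (by omega)) (by simpa using h0)
    simp only [ecRowFind, beq_iff_eq, hv, if_false, this]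
    congr 1
    omega

theorem ecFind_none : ∀ (m : List (List Int)) (i0 : Nat),
    (∀ i < m.length, ∀ j < (m.getD i []).length, (m.getD i []).getD j 0 ≠ 0) →
    ecFind m i0 = (-1, -1)
  | [], _, _ => rfl
  | row :: rest, i0, h => by
    have h0 : ecRowFind row 0 = none :=
      ecRow_none row 0 (fun j hj => by simpa using h 0 (by simp) j (by simpa using hj))
    simp only [ecFind, h0]
    exact ecFind_none rest (i0 + 1)
      (fun i hi j hj => by simpa using h (i + 1) (by simpa using hi) j (by simpa using hj))

theorem ecFind_some : ∀ (m : List (List Int)) (y x i0 : Nat), y < m.length →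
    (∀ i < y, ∀ j < (m.getD i []).length, (m.getD i []).getD j 0 ≠ 0) →
    (∀ j < x, (m.getD y []).getD j 0 ≠ 0) →
    x < (m.getD y []).length → (m.getD y []).getD x 0 = 0 →
    ecFind m i0 = (((i0 + y : Nat) : Int), (x : Int))
  | row :: rest, 0, x, i0, _, _, hpre, hx, h0 => by
    have : ecRowFind row 0 = some (0 + x) :=
      ecRow_some row x 0 (by simpa using hx) (fun j hj => by simpa using hpre j hj)
        (by simpa using h0)
    simp [ecFind, this]
  | row :: rest, y + 1, x, i0, hy, hrows, hpre, hx, h0 => by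
    have hr0 : ecRowFind row 0 = none :=
      ecRow_none row 0 (fun j hj => by simpa using hrows 0 (by omega) j (by simpa using hj))
    have := ecFind_some rest y x (i0 + 1) (by simpa using hy)
      (fun i hi j hj => by simpa using hrows (i + 1) (by omega) j (by simpa using hj))
      (fun j hj => by simpa using hpre j hj) (by simpa using hx) (by simpa using h0)
    simp only [ecFind, hr0, this]
    congr 2
    omega

theorem getD_setCell_ne (m : List (List Int)) (y x : Nat) (v : Int) (i : Nat) (hi : i ≠ y) :
    (setCell m y x v).getD i [] = m.getD i [] := by
  unfold setCell
  simp [List.getD, List.getElem?_set_ne (Ne.symm hi)]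

theorem getD_setCell_self (m : List (List Int)) (y x : Nat) (v : Int) (hy : y < m.length) :
    (setCell m y x v).getD y [] = (m.getD y []).set x v := by
  unfold setCell
  simp [List.getD, hy]

theorem cellGet_set_self (m : List (List Int)) (y x : Nat) (v : Int)
    (hy : y < m.length) (hx : x < (m.getD y []).length) :
    cellGet (setCell m y x v) y x = v := by
  unfold cellGet
  rw [getD_setCell_self m y x v hy]
  have hx' : x < (m.getD y []).length := hx
  simp only [List.getD] at hx' ⊢
  simp [hx']

theorem cellGet_set_ne (m : List (List Int)) (y x : Nat) (v : Int) (i j : Nat)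
    (h : (i, j) ≠ (y, x)) : cellGet (setCell m y x v) i j = cellGet m i j := by
  by_cases hi : i = y
  · subst hi
    have hj : j ≠ x := fun e => h (by rw [e])
    by_cases hy : i < m.length
    · unfold cellGet
      rw [getD_setCell_self m i x v hy]
      simp [List.getD, List.getElem?_set_ne (Ne.symm hj)]
    · unfold cellGet setCell
      rw [List.set_eq_of_length_le (Nat.le_of_not_lt hy)]
  · unfold cellGet
    rw [getD_setCell_ne m y x v i hi]

theorem positions_setCell (m : List (List Int)) (y x : Nat) (v : Int) :
    positions (setCell m y x v) = positions m := by
  have hlen : (setCell m y x v).length = m.length := List.length_set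
  have hrow : ∀ i, ((setCell m y x v).getD i []).length = (m.getD i []).length := by
    intro i
    by_cases hi : i = y
    · subst hi
      by_cases hy : i < m.length
      · rw [getD_setCell_self m i x v hy, List.length_set]
      · unfold setCell
        rw [List.set_eq_of_length_le (Nat.le_of_not_lt hy)]
    · rw [getD_setCell_ne m y x v i hi]
  unfold positions
  rw [hlen]
  have : (fun i => (List.range (((setCell m y x v).getD i []).length)).map (fun j => (i, j))) =
      (fun i => (List.range ((m.getD i []).length)).map (fun j => (i, j))) := by
    funext i
    rw [hrow i]
  rw [this]

theorem count_set_zero : ∀ (row : List Int) (x : Nat) (v : Int), x < row.length →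
    row.getD x 0 = 0 → v ≠ 0 → (row.set x v).count 0 + 1 = row.count 0
  | a :: l, 0, v, _, h0, hv => by
    have ha : a = 0 := by simpa using h0
    simp [ha, hv]
  | a :: l, x + 1, v, hx, h0, hv => by
    have := count_set_zero l x v (by simpa using hx) (by simpa using h0) hv
    simp only [List.set_cons_succ, List.count_cons]
    omega

theorem zeros_set : ∀ (m : List (List Int)) (y x : Nat) (v : Int), y < m.length →
    x < (m.getD y []).length → cellGet m y x = 0 → v ≠ 0 →
    zeros (setCell m y x v) + 1 = zeros m
  | row :: rest, 0, x, v, _, hx, h0, hv => by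
    have h := count_set_zero row x v (by simpa using hx) (by simpa [cellGet] using h0) hv
    simp only [setCell, List.getD_cons_zero, List.set_cons_zero, zeros, List.map_cons,
      List.sum_cons]
    omega
  | row :: rest, y + 1, x, v, hy, hx, h0, hv => by
    have h := zeros_set rest y x v (by simpa using hy) (by simpa using hx)
      (by simpa [cellGet] using h0) hv
    simp only [setCell, List.getD_cons_succ, List.set_cons_succ, zeros, List.map_cons,
      List.sum_cons] at h ⊢
    omega

theorem main_eq : ∀ (ps qs : List (Nat × Nat)) (m : List (List Int)) (n : Nat),
    zeros m < n → positions m = qs ++ ps →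
    (∀ p ∈ qs, cellGet m p.1 p.2 ≠ 0) →
    cfGo n m = solveGo ps m := by
  intro ps
  induction ps with
  | nil =>
    intro qs m n hn hpos hq
    obtain ⟨n', rfl⟩ : ∃ n', n = n' + 1 := ⟨n - 1, by omega⟩
    have hec : empty_cell m = (-1, -1) := by
      unfold empty_cell
      apply ecFind_none
      intro i hi j hj
      have hmem : (i, j) ∈ positions m := mem_positions.mpr ⟨hi, hj⟩
      rw [hpos, List.append_nil] at hmem
      simpa [cellGet] using hq _ hmem
    simp [cfGo, hec, solveGo]
  | cons p rest ih =>
    obtain ⟨y, x⟩ := p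
    intro qs m n hn hpos hq
    have hmem : (y, x) ∈ positions m := by rw [hpos]; simp
    have hy : y < m.length := (mem_positions.mp hmem).1
    have hx : x < (m.getD y []).length := (mem_positions.mp hmem).2
    by_cases hc : cellGet m y x = 0
    · obtain ⟨n', rfl⟩ : ∃ n', n = n' + 1 := ⟨n - 1, by omega⟩
      have hlt : ∀ i j, i < m.length → j < (m.getD i []).length → plt (i, j) (y, x) →
          (m.getD i []).getD j 0 ≠ 0 := by
        intro i j hi hj hplt
        have hmem2 : (i, j) ∈ positions m := mem_positions.mpr ⟨hi, hj⟩
        rw [hpos] at hmem2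
        rcases List.mem_append.mp hmem2 with h | h
        · simpa [cellGet] using hq _ h
        · rcases List.mem_cons.mp h with h | h
          · exfalso
            obtain ⟨rfl, rfl⟩ : i = y ∧ j = x := by
              constructor <;> [exact congrArg Prod.fst h; exact congrArg Prod.snd h]
            rcases hplt with h' | ⟨_, h'⟩ <;> omega
          · exfalso
            have hpw := pairwise_positions m
            rw [hpos] at hpw
            have h2 : plt (y, x) (i, j) :=
              (List.pairwise_cons.mp (List.pairwise_append.mp hpw).2.1).1 _ h
            rcases hplt with h' | ⟨e, h'⟩ <;> rcases h2 with h'' | ⟨e', h''⟩ <;>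
              simp_all <;> omega
      have hec : empty_cell m = ((y : Int), (x : Int)) := by
        unfold empty_cell
        have := ecFind_some m y x 0 hy
          (fun i hi j hj => hlt i j (lt_trans hi hy) hj (Or.inl hi))
          (fun j hj => hlt y j hy (lt_trans hj hx) (Or.inr ⟨rfl, hj⟩))
          hx (by simpa [cellGet] using hc)
        simpa using this
      have key : ∀ (v : Int), v ≠ 0 →
          cfGo n' (setCell m y x v) = solveGo rest (setCell m y x v) := by
        intro v hv
        have hz := zeros_set m y x v hy hx hc hv
        apply ih (qs ++ [(y, x)])
        · omega
        · rw [positions_setCell, hpos]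
          simp
        · intro p hp
          rcases List.mem_append.mp hp with h | h
          · have hne : p ≠ (y, x) := by
              intro e
              exact hq _ h (by rw [e]; exact hc)
            rw [show p = (p.1, p.2) from rfl] at hne ⊢
            rw [cellGet_set_ne m y x v p.1 p.2 hne]
            exact hq _ h
          · have : p = (y, x) := by simpa using h
            subst this
            rw [cellGet_set_self m y x v hy hx]
            exact hv
      have e1 := key 1 one_ne_zero
      have e2 := key 2 two_ne_zero
      have hy1 : ((y : Int) == -1) = false := by
        simp only [beq_eq_false_iff_ne, ne_eq]
        omega
      simp only [cfGo, solveGo, hec, hy1, Bool.false_eq_true, if_false, Int.toNat_natCast,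
        hc, beq_self_eq_true, Bool.not_true, e1, e2]
    · have hskip : solveGo ((y, x) :: rest) m = solveGo rest m := by
        simp [solveGo, hc]
      rw [hskip]
      apply ih (qs ++ [(y, x)]) m n hn
      · rw [hpos]; simp
      · intro p hp
        rcases List.mem_append.mp hp with h | h
        · exact hq _ h
        · have : p = (y, x) := by simpa using h
          subst this
          exact hc

-- ===== VERDICT (by name: the statement is the Claim_ definition above) =====
theorem complete_field_spec : Claim_equal_complete_field := by
  intro matrix _ _
  unfold Spec_complete_field complete_field complete_field_alt
  exact main_eq (positions matrix) [] matrix (zeros matrix + 1) (by omega) (by simp) (by simp)
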